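-- pv_equiv track=rewrite | github.com/broadinstitute/dig-portal-data-models | scripts/phenotype/01_parse_sources.py | uri_to_curie
-- ===== SOURCE A (Python) =====
-- def uri_to_curie(uri: str) -> str:
--     """Convert an ontology URI to a CURIE.
--
--     e.g., http://www.ebi.ac.uk/efo/EFO_0000275 → EFO:0000275
--           http://purl.obolibrary.org/obo/MONDO_0004981 → MONDO:0004981
--     """
--     prefix_map = {
--         "http://www.ebi.ac.uk/efo/EFO_": "EFO:",
--         "http://purl.obolibrary.org/obo/MONDO_": "MONDO:",
--         "http://purl.obolibrary.org/obo/HP_": "HP:",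
--         "http://purl.obolibrary.org/obo/DOID_": "DOID:",
--         "http://purl.obolibrary.org/obo/CHEBI_": "CHEBI:",
--         "http://purl.obolibrary.org/obo/OBA_": "OBA:",
--         "http://purl.obolibrary.org/obo/CMO_": "CMO:",
--         "http://www.orpha.net/ORDO/Orphanet_": "ORPHANET:",
--         "http://id.nlm.nih.gov/mesh/": "MESH:",
--         # Newer EFO pattern
--         "http://www.ebi.ac.uk/efo/": "EFO:",
--         # OBO generic
--         "http://purl.obolibrary.org/obo/": "",
--     }
--     for prefix, curie_prefix in prefix_map.items():
--         if uri.startswith(prefix):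
--             local = uri[len(prefix):]
--             if not curie_prefix and "_" in local:
--                 # Generic OBO: GO_0001234 → GO:0001234
--                 parts = local.split("_", 1)
--                 return f"{parts[0]}:{parts[1]}"
--             return f"{curie_prefix}{local}"
--     return uri  # Return as-is if no match
-- ===== SOURCE B (Python) =====
-- def uri_to_curie(uri: str) -> str:
--     """Convert an ontology URI to a CURIE (gather-then-select longest prefix)."""
--     prefix_map = {
--         "http://www.ebi.ac.uk/efo/EFO_": "EFO:",
--         "http://purl.obolibrary.org/obo/MONDO_": "MONDO:",
--         "http://purl.obolibrary.org/obo/HP_": "HP:",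
--         "http://purl.obolibrary.org/obo/DOID_": "DOID:",
--         "http://purl.obolibrary.org/obo/CHEBI_": "CHEBI:",
--         "http://purl.obolibrary.org/obo/OBA_": "OBA:",
--         "http://purl.obolibrary.org/obo/CMO_": "CMO:",
--         "http://www.orpha.net/ORDO/Orphanet_": "ORPHANET:",
--         "http://id.nlm.nih.gov/mesh/": "MESH:",
--         "http://www.ebi.ac.uk/efo/": "EFO:",
--         "http://purl.obolibrary.org/obo/": "",
--     }
--     # Phase 1: gather every matching prefix.
--     candidates = [item for item in prefix_map.items() if uri.startswith(item[0])]
--     if not candidates: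
--         return uri  # Return as-is if no match
--     # Phase 2: pick the most specific (longest) matching prefix.
--     prefix, curie_prefix = max(candidates, key=lambda item: len(item[0]))
--     local = uri[len(prefix):]
--     if not curie_prefix and "_" in local:
--         parts = local.split("_", 1)
--         return f"{parts[0]}:{parts[1]}"
--     return f"{curie_prefix}{local}"
-- ===== Notes on version B (the rewrite author's own statement) =====
-- stated objective: alternative
-- what changed: A's single ordered scan with first-match short-circuit is replaced by a two-phase pass: gather all matching (prefix, curie_prefix) pairs, then select the longest (most specific) matching prefix and apply the transformation to it, so the result no longer depends on dict insertion order.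
import Mathlib
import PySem

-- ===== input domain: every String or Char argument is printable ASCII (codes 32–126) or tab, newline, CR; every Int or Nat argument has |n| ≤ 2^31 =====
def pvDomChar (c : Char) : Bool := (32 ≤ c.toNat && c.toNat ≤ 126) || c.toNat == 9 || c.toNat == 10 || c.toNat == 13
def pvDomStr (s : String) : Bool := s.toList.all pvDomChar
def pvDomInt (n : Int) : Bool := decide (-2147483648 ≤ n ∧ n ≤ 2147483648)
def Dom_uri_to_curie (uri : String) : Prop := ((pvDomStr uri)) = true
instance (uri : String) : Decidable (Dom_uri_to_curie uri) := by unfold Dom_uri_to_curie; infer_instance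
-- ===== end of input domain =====

-- B replaces A's ordered first-match scan by a gather-all-matches pass followed by a
-- select-the-longest-prefix step (objective: alternative decomposition, same cost).

-- the prefix_map dict literal both Pythons build (distinct keys, insertion order);
-- the dict is only iterated via items(), so its items list is the exact port
def pvPrefixMap : List (String × String) :=
  [("http://www.ebi.ac.uk/efo/EFO_", "EFO:"),
   ("http://purl.obolibrary.org/obo/MONDO_", "MONDO:"),
   ("http://purl.obolibrary.org/obo/HP_", "HP:"),
   ("http://purl.obolibrary.org/obo/DOID_", "DOID:"),
   ("http://purl.obolibrary.org/obo/CHEBI_", "CHEBI:"),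
   ("http://purl.obolibrary.org/obo/OBA_", "OBA:"),
   ("http://purl.obolibrary.org/obo/CMO_", "CMO:"),
   ("http://www.orpha.net/ORDO/Orphanet_", "ORPHANET:"),
   ("http://id.nlm.nih.gov/mesh/", "MESH:"),
   ("http://www.ebi.ac.uk/efo/", "EFO:"),
   ("http://purl.obolibrary.org/obo/", "")]

-- ===== PORT A =====
-- the for-loop over prefix_map.items() with early returns
def pvLoopA (uri : String) : List (String × String) → String
  | [] => uri  -- Return as-is if no match
  | (pre, cp) :: rest =>
    if PySem.Str.startswith uri pre then
      let lcl := PySem.Str.slice uri (some (PySem.Str.len pre)) none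
      if cp == "" && PySem.Str.isIn "_" lcl then
        -- local.split("_", 1); indices 0/1 always exist since "_" in local (pyGetD default never used)
        let parts := (PySem.Str.splitMax? lcl "_" 1).getD []
        PySem.List.pyGetD parts 0 "" ++ ":" ++ PySem.List.pyGetD parts 1 ""
      else
        cp ++ lcl
    else pvLoopA uri rest

def uri_to_curie (uri : String) : String :=
  pvLoopA uri pvPrefixMap

-- ===== PORT B =====
def uri_to_curie_alt (uri : String) : String :=
  -- Phase 1: gather every matching (prefix, curie_prefix)
  let candidates := pvPrefixMap.filter (fun item => PySem.Str.startswith uri item.1)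
  match candidates with
  | [] => uri  -- Return as-is if no match
  | c :: cs =>
    -- Phase 2: max(candidates, key=len of prefix) — first maximum, replace only on strictly greater
    let best := cs.foldl
      (fun acc item => if PySem.Str.len item.1 > PySem.Str.len acc.1 then item else acc) c
    let lcl := PySem.Str.slice uri (some (PySem.Str.len best.1)) none
    if best.2 == "" && PySem.Str.isIn "_" lcl then
      let parts := (PySem.Str.splitMax? lcl "_" 1).getD []
      PySem.List.pyGetD parts 0 "" ++ ":" ++ PySem.List.pyGetD parts 1 ""
    else
      best.2 ++ lcl

-- ===== PRECONDITION & SPEC =====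
def Spec_uri_to_curie (uri : String) (out : String) : Prop := out = uri_to_curie_alt uri
instance (uri : String) (out : String) : Decidable (Spec_uri_to_curie uri out) := by unfold Spec_uri_to_curie; infer_instance

-- ===== CLAIM (what is proved, stated in full; the proofs are below) =====
def Claim_equal_uri_to_curie : Prop := ∀ (uri : String), Dom_uri_to_curie uri → Spec_uri_to_curie uri (uri_to_curie uri)

-- ===== LEMMAS AND PROOFS =====

-- the shared tail transformation, factored out for the proofs only
def pvTrans (uri : String) (c : String × String) : String :=
  let lcl := PySem.Str.slice uri (some (PySem.Str.len c.1)) none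
  if c.2 == "" && PySem.Str.isIn "_" lcl then
    let parts := (PySem.Str.splitMax? lcl "_" 1).getD []
    PySem.List.pyGetD parts 0 "" ++ ":" ++ PySem.List.pyGetD parts 1 ""
  else
    c.2 ++ lcl

-- A's first-match loop is the transform of the head of the match list
theorem pvLoopA_eq_filter (uri : String) (l : List (String × String)) :
    pvLoopA uri l =
      match l.filter (fun item => PySem.Str.startswith uri item.1) with
      | [] => uri
      | c :: _ => pvTrans uri c := by
  induction l with
  | nil => rfl
  | cons hd tl ih =>
    obtain ⟨p, cp⟩ := hd
    by_cases h : PySem.Str.startswith uri p = true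
    · simp only [pvLoopA, h, if_true, List.filter_cons, pvTrans]
    · rw [Bool.not_eq_true] at h
      simp only [pvLoopA, h, Bool.false_eq_true, if_false, List.filter_cons, ih]

-- the max-by-length fold keeps the head when nothing later is strictly longer
theorem pvFold_keep (c : String × String) (cs : List (String × String))
    (h : ∀ x ∈ cs, PySem.Str.len x.1 ≤ PySem.Str.len c.1) :
    cs.foldl (fun acc item => if PySem.Str.len item.1 > PySem.Str.len acc.1 then item else acc) c = c := by
  induction cs with
  | nil => rfl
  | cons x xs ih =>
    rw [List.foldl_cons, if_neg (by have := h x (List.mem_cons_self) ; omega)]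
    exact ih (fun y hy => h y (List.mem_cons_of_mem _ hy))

-- no earlier key of the table is a prefix of a later key
theorem pvTable_pairwise :
    pvPrefixMap.Pairwise (fun a b => ¬ a.1.toList <+: b.1.toList) := by decide

-- ===== VERDICT (by name: the statement is the Claim_ definition above) =====
theorem uri_to_curie_spec : Claim_equal_uri_to_curie := by
  intro uri _
  unfold Spec_uri_to_curie
  rw [uri_to_curie, pvLoopA_eq_filter]
  rcases hf : pvPrefixMap.filter (fun item => PySem.Str.startswith uri item.1) with _ | ⟨c, cs⟩
  · simp only [uri_to_curie_alt, hf]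
  · have hpw := pvTable_pairwise.filter (fun item => PySem.Str.startswith uri item.1)
    rw [hf, List.pairwise_cons] at hpw
    have hcmem : c ∈ pvPrefixMap.filter (fun item => PySem.Str.startswith uri item.1) :=
      hf ▸ List.mem_cons_self
    have hc : PySem.Str.startswith uri c.1 = true := by simpa using List.of_mem_filter hcmem
    have hbound : ∀ x ∈ cs, PySem.Str.len x.1 ≤ PySem.Str.len c.1 := by
      intro x hx
      have hxmem : x ∈ pvPrefixMap.filter (fun item => PySem.Str.startswith uri item.1) :=
        hf ▸ List.mem_cons_of_mem c hx
      have hxf : PySem.Str.startswith uri x.1 = true := by simpa using List.of_mem_filter hxmem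
      rw [PySem.Str.startswith_eq, PySem.Chars.startswith_iff] at hc hxf
      simp only [PySem.Str.len_eq]
      by_contra hlt
      rw [not_le] at hlt
      have : c.1.toList <+: x.1.toList :=
        List.prefix_of_prefix_length_le hc hxf (by exact_mod_cast hlt.le)
      exact hpw.1 x hx this
    simp only [uri_to_curie_alt, hf, pvFold_keep c cs hbound]
    rfl
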